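-- pv_equiv track=rewrite | github.com/saulpw/visidata | visidata/fuzzymatch.py | asciiFuzzyIndex
-- ===== SOURCE A (Python) =====
-- def asciiFuzzyIndex(target, pattern):
--     '''Return a fuzzy* starting position of the pattern,
--     or -1, if pattern isn't a fuzzy match.
--
--     *the position is adapted one back, if possible,
--     for bonus determination reasons.
--     '''
--     first_idx, idx = 0, 0
--     for pidx in range(len(pattern)):
--         idx = target.find(pattern[pidx], idx)
--         if idx < 0:
--             return -1
--         if pidx == 0 and idx > 0:
--             # Step back to find the right bonus point
--             first_idx = idx - 1
--         idx += 1
--     return first_idx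
-- ===== SOURCE B (Python) =====
-- def asciiFuzzyIndex(target, pattern):
--     '''Single explicit pass over target: advance a pattern pointer on each
--     matching character, remember the position where the first pattern char
--     matched, and derive the (stepped-back) start position at the end.'''
--     if not pattern:
--         return 0
--     pidx = 0
--     first_pos = -1
--     for i, c in enumerate(target):
--         if c == pattern[pidx]:
--             if pidx == 0:
--                 first_pos = i
--             pidx += 1
--             if pidx == len(pattern):
--                 break
--     if pidx < len(pattern):
--         return -1
--     return first_pos - 1 if first_pos > 0 else 0
-- ===== Notes on version B (the rewrite author's own statement) =====
-- stated objective: alternative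
-- what changed: Replaces the loop over pattern characters with repeated str.find calls by a single explicit left-to-right scan of target maintaining a pattern pointer and the first-match position.
import Mathlib
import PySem

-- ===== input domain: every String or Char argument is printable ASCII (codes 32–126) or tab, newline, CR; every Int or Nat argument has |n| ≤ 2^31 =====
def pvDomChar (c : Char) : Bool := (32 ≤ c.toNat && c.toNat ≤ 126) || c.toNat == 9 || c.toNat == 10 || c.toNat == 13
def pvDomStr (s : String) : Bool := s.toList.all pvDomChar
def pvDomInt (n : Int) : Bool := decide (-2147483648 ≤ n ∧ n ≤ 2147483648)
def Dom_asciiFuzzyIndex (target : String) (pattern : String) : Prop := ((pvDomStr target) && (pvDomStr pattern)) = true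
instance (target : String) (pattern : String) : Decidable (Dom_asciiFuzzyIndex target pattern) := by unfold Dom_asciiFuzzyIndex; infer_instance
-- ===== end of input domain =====

-- B replaces A's per-pattern-char str.find loop by one explicit scan of target with a pattern pointer (alternative decomposition, same behaviour).

-- ===== PORT A =====
-- 'for pidx in range(len(pattern)): idx = target.find(pattern[pidx], idx); …'
def asciiFuzzyIndexLoop (target : String) (pattern : String) :
    List Int → Int → Int → Int
  | [], first_idx, _ => first_idx
  | pidx :: rest, first_idx, idx =>
    let c := (PySem.Str.pyGet? pattern pidx).getD ' '   -- pidx ∈ range(len(pattern)), always in range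
    let idx' := PySem.Str.findFrom target (String.singleton c) idx
    if idx' < 0 then -1
    else
      let first_idx' := if pidx == 0 && idx' > 0 then idx' - 1 else first_idx
      asciiFuzzyIndexLoop target pattern rest first_idx' (idx' + 1)

def asciiFuzzyIndex (target : String) (pattern : String) : Int :=
  asciiFuzzyIndexLoop target pattern
    (PySem.List.pyRange 0 (PySem.Str.len pattern) 1) 0 0

-- ===== PORT B =====
-- 'for i, c in enumerate(target): …' with pattern pointer pidx and first_pos
def asciiFuzzyIndexAltLoop (pat : List Char) (plen : Nat) :
    List Char → Int → Nat → Int → Nat × Int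
  | [], _, pidx, first_pos => (pidx, first_pos)
  | c :: rest, i, pidx, first_pos =>
    if pat[pidx]? = some c then
      let first_pos' := if pidx = 0 then i else first_pos
      let pidx' := pidx + 1
      if pidx' = plen then (pidx', first_pos')
      else asciiFuzzyIndexAltLoop pat plen rest (i + 1) pidx' first_pos'
    else asciiFuzzyIndexAltLoop pat plen rest (i + 1) pidx first_pos

def asciiFuzzyIndex_alt (target : String) (pattern : String) : Int :=
  let pat := pattern.toList
  if pat.isEmpty then 0
  else
    let r := asciiFuzzyIndexAltLoop pat pat.length target.toList 0 0 (-1)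
    if r.1 < pat.length then -1
    else if r.2 > 0 then r.2 - 1 else 0

-- ===== PRECONDITION & SPEC =====
def Spec_asciiFuzzyIndex (target : String) (pattern : String) (out : Int) : Prop := out = asciiFuzzyIndex_alt target pattern
instance (target : String) (pattern : String) (out : Int) : Decidable (Spec_asciiFuzzyIndex target pattern out) := by unfold Spec_asciiFuzzyIndex; infer_instance

-- ===== CLAIM (what is proved, stated in full; the proofs are below) =====
def Claim_equal_asciiFuzzyIndex : Prop := ∀ (target : String) (pattern : String), Dom_asciiFuzzyIndex target pattern → Spec_asciiFuzzyIndex target pattern (asciiFuzzyIndex target pattern)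

-- ===== LEMMAS AND PROOFS =====

def gmatch : List Char → List Char → Bool
  | [], _ => true
  | _ :: _, [] => false
  | p :: ps, c :: tgt => if c = p then gmatch ps tgt else gmatch (p :: ps) tgt

theorem find_singleton (s : List Char) (c : Char) :
    PySem.Chars.find s [c] =
      match s.findIdx? (· = c) with
      | none => -1
      | some j => (j : Int) := by
  cases h : s.findIdx? (· = c) with
  | none =>
    rw [List.findIdx?_eq_none_iff] at h
    simp only []
    rw [PySem.Chars.find_eq_neg_one_iff]
    intro hinf
    have hc : c ∈ s := (List.singleton_sublist).mp hinf.sublist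
    have := h c hc
    simp at this
  | some j =>
    rw [List.findIdx?_eq_some_iff_getElem] at h
    obtain ⟨hj, hcj, hmin⟩ := h
    have hc : c ∈ s := by
      have := List.getElem_mem hj
      simp at hcj
      rwa [hcj] at this
    have hinf : [c] <:+: s := by
      obtain ⟨l, r, rfl⟩ := List.mem_iff_append.mp hc
      exact ⟨l, r, by simp⟩
    have hnn : 0 ≤ PySem.Chars.find s [c] := (PySem.Chars.find_nonneg_iff s [c]).mpr hinf
    obtain ⟨hpre, hlt⟩ := PySem.Chars.find_spec hnn
    set n := (PySem.Chars.find s [c]).toNat with hn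
    have hpre' : s[n]? = some c := by
      rw [← List.head?_drop]
      obtain ⟨l', hl', _⟩ := List.cons_prefix_iff.mp hpre
      rw [hl']; rfl
    simp at hcj
    -- n = j
    have hne : ¬ j < n := by
      intro hlt'
      apply hlt j hlt'
      rw [List.cons_prefix_iff]
      refine ⟨List.drop (j+1) s, ?_, List.nil_prefix⟩
      rw [← List.getElem_cons_drop hj, hcj]
    have hne2 : ¬ n < j := by
      intro hlt'
      have hn' : n < s.length := by
        have := List.getElem?_eq_some_iff.mp hpre'
        exact this.1
      have := hmin n hlt'
      simp at this
      have : s[n] ≠ c := this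
      have : s[n]? = some s[n] := List.getElem?_eq_getElem hn'
      rw [hpre'] at this
      exact ‹s[n] ≠ c› (by injection this with h'; exact h'.symm)
    have : n = j := by omega
    simp only []
    omega

theorem gmatch_cons_eq (p : Char) (ps tgt : List Char) :
    gmatch (p :: ps) tgt =
      match tgt.findIdx? (· = p) with
      | none => false
      | some j => gmatch ps (tgt.drop (j + 1)) := by
  induction tgt with
  | nil => rfl
  | cons c tgt ih =>
    rw [List.findIdx?_cons]
    by_cases hc : c = p
    · simp [gmatch, hc]
    · simp only [gmatch, ih, hc, decide_false]
      cases h : tgt.findIdx? (· = p) <;> simp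

theorem find_singleton_none {s : List Char} {c : Char}
    (h : s.findIdx? (· = c) = none) : PySem.Chars.find s [c] = -1 := by
  rw [find_singleton, h]

theorem find_singleton_some {s : List Char} {c : Char} {j : Nat}
    (h : s.findIdx? (· = c) = some j) : PySem.Chars.find s [c] = (j : Int) := by
  rw [find_singleton, h]

theorem gmatch_cons_none {p : Char} {ps tgt : List Char}
    (h : tgt.findIdx? (· = p) = none) : gmatch (p :: ps) tgt = false := by
  rw [gmatch_cons_eq, h]

theorem gmatch_cons_some {p : Char} {ps tgt : List Char} {j : Nat}
    (h : tgt.findIdx? (· = p) = some j) :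
    gmatch (p :: ps) tgt = gmatch ps (tgt.drop (j + 1)) := by
  rw [gmatch_cons_eq, h]

theorem altLoop_rest (pat : List Char) (plen : Nat) (hplen : plen = pat.length)
    (tgt : List Char) (i : Int) (pidx : Nat) (fp : Int)
    (h1 : 1 ≤ pidx) (h2 : pidx ≤ plen) :
    (asciiFuzzyIndexAltLoop pat plen tgt i pidx fp).2 = fp ∧
    (asciiFuzzyIndexAltLoop pat plen tgt i pidx fp).1 ≤ plen ∧
    ((asciiFuzzyIndexAltLoop pat plen tgt i pidx fp).1 = plen ↔
      gmatch (pat.drop pidx) tgt = true) := by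
  induction tgt generalizing i pidx fp with
  | nil =>
    refine ⟨rfl, h2, ?_⟩
    simp only [asciiFuzzyIndexAltLoop]
    constructor
    · intro h; subst h; rw [hplen, List.drop_length]; rfl
    · intro h
      by_contra hne
      have hlt : pidx < pat.length := by omega
      rw [← List.getElem_cons_drop hlt] at h
      simp [gmatch] at h
  | cons c rest ih =>
    by_cases hend : pidx = plen
    · subst hend
      have hnone : pat[pidx]? = none := by
        rw [List.getElem?_eq_none_iff]; omega
      simp only [asciiFuzzyIndexAltLoop, hnone]
      have := ih (i+1) pidx fp h1 h2
      simp only [reduceCtorEq, if_false] at *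
      refine ⟨this.1, this.2.1, ?_⟩
      rw [this.2.2]
      rw [hplen, List.drop_length]
      simp [gmatch]
    · have hlt : pidx < pat.length := by omega
      have hdrop : pat.drop pidx = pat[pidx] :: pat.drop (pidx+1) := (List.getElem_cons_drop hlt).symm
      by_cases hc : pat[pidx] = c
      · have hsome : pat[pidx]? = some c := by rw [List.getElem?_eq_getElem hlt, hc]
        simp only [asciiFuzzyIndexAltLoop, hsome, reduceIte]
        have hp0 : ¬ pidx = 0 := by omega
        simp only [if_neg hp0]
        by_cases hbr : pidx + 1 = plen
        · simp only [if_pos hbr]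
          have hd2 : List.drop (pidx + 1) pat = [] := by
            rw [List.drop_eq_nil_iff]; omega
          refine ⟨by simp, by omega, ?_⟩
          rw [hdrop]
          simp [gmatch, hc.symm, hbr]
          rw [hplen, List.drop_length]
          cases rest <;> rfl
        · simp only [if_neg hbr]
          have := ih (i+1) (pidx+1) fp (by omega) (by omega)
          refine ⟨this.1, this.2.1, ?_⟩
          rw [this.2.2, hdrop]
          simp [gmatch, hc.symm]
      · have hne : ¬ pat[pidx]? = some c := by
          rw [List.getElem?_eq_getElem hlt]; simp [hc]
        simp only [asciiFuzzyIndexAltLoop, if_neg hne]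
        have := ih (i+1) pidx fp h1 h2
        refine ⟨this.1, this.2.1, ?_⟩
        rw [this.2.2, hdrop]
        have : ¬ c = pat[pidx] := fun h => hc h.symm
        simp [gmatch, this, ← hdrop]

theorem altLoop_head (p : Char) (ps : List Char) (plen : Nat)
    (tgt : List Char) (i : Int) (fp : Int) :
    asciiFuzzyIndexAltLoop (p :: ps) plen tgt i 0 fp =
      match tgt.findIdx? (· = p) with
      | none => (0, fp)
      | some j =>
          if plen = 1 then (1, i + j)
          else asciiFuzzyIndexAltLoop (p :: ps) plen (tgt.drop (j + 1)) (i + j + 1) 1 (i + j) := by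
  induction tgt generalizing i fp with
  | nil => rfl
  | cons c rest ih =>
    rw [List.findIdx?_cons]
    by_cases hc : c = p
    · have hsome : (p :: ps)[0]? = some c := by simp [hc]
      simp only [asciiFuzzyIndexAltLoop, hsome, reduceIte, hc, decide_true]
      simp [eq_comm]
    · have hne : ¬ (p :: ps)[0]? = some c := by simp; exact fun h => hc h.symm
      simp only [asciiFuzzyIndexAltLoop, if_neg hne, ih, hc, decide_false]
      cases h : rest.findIdx? (· = p) with
      | none => simp
      | some j =>
        simp only [Option.map_some, Bool.false_eq_true, if_false, List.drop_succ_cons]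
        push_cast
        ring_nf

theorem loopA_eq (target pattern : String) (ps : List Char) (k : Nat)
    (hk : 1 ≤ k) (hdrop : pattern.toList.drop k = ps)
    (idx : Int) (h0 : 0 ≤ idx) (hle : idx.toNat ≤ target.toList.length)
    (fi : Int) :
    asciiFuzzyIndexLoop target pattern
        (PySem.List.pyRange (k : Int) (pattern.toList.length : Int) 1) fi idx =
      if gmatch ps (target.toList.drop idx.toNat) then fi else -1 := by
  induction ps generalizing k idx fi with
  | nil =>
    have hlen : pattern.toList.length ≤ k := by
      rw [← List.drop_eq_nil_iff]; exact hdrop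
    rw [PySem.List.pyRange_one_eq_nil (by exact_mod_cast hlen)]
    simp only [asciiFuzzyIndexLoop]
    cases target.toList.drop idx.toNat <;> rfl
  | cons p ps ih =>
    have hklt : k < pattern.toList.length := by
      by_contra hge
      rw [List.drop_eq_nil_iff.mpr (by omega)] at hdrop
      exact List.cons_ne_nil p ps hdrop.symm
    have hget : pattern.toList[k]? = some p := by
      rw [← List.head?_drop, hdrop]; rfl
    rw [PySem.List.pyRange_one_cons (by exact_mod_cast hklt)]
    simp only [asciiFuzzyIndexLoop, PySem.Str.pyGet?_natCast, hget, Option.getD_some,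
      PySem.Str.findFrom_eq, String.toList_singleton]
    have hidx : ((idx.toNat : Int)) = idx := Int.toNat_of_nonneg h0
    conv_lhs => rw [← hidx]
    rw [PySem.Chars.findFrom_natCast _ _ _ hle]
    cases hF : (target.toList.drop idx.toNat).findIdx? (· = p) with
    | none =>
      rw [find_singleton_none hF, gmatch_cons_none hF]
      simp
    | some j =>
      have hjlt : j < (target.toList.drop idx.toNat).length := by
        rw [List.findIdx?_eq_some_iff_getElem] at hF
        exact hF.1
      rw [List.length_drop] at hjlt
      rw [find_singleton_some hF, gmatch_cons_some hF]
      have hne : ¬ ((j : Int) = -1) := by omega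
      rw [if_neg hne]
      have hnn : ¬ ((idx.toNat : Int) + (j : Int) < 0) := by omega
      rw [if_neg hnn]
      have hk0 : (((k : Int)) == 0) = false := by
        simp; omega
      simp only [hk0, Bool.false_and, Bool.false_eq_true, if_false]
      have hdrop' : pattern.toList.drop (k + 1) = ps := by
        rw [← List.tail_drop, hdrop, List.tail_cons]
      have hcast : ((k : Int)) + 1 = ((k + 1 : Nat) : Int) := by push_cast; ring
      have hstep : (idx.toNat : Int) + (j : Int) + 1 = ((idx.toNat + j + 1 : Nat) : Int) := by
        push_cast; ring
      rw [hcast, hstep]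
      rw [ih (k + 1) (by omega) hdrop' _ (by positivity) (by rw [Int.toNat_natCast]; omega) fi]
      rw [Int.toNat_natCast, List.drop_drop]
      have heq : idx.toNat + (j + 1) = idx.toNat + j + 1 := by omega
      rw [heq]

theorem main_eq (target pattern : String) :
    asciiFuzzyIndex target pattern = asciiFuzzyIndex_alt target pattern := by
  unfold asciiFuzzyIndex asciiFuzzyIndex_alt
  rw [PySem.Str.len_eq]
  cases hp : pattern.toList with
  | nil =>
    rw [PySem.List.pyRange_one_eq_nil (by simp)]
    simp [asciiFuzzyIndexLoop]
  | cons p ps =>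
    have hlen : (0:Int) < ((p :: ps).length : Int) := by
      simp
    rw [PySem.List.pyRange_one_cons hlen]
    simp only [asciiFuzzyIndexLoop]
    have hget0 : PySem.Str.pyGet? pattern (0:Int) = pattern.toList[0]? := by
      exact_mod_cast PySem.Str.pyGet?_natCast pattern 0
    rw [hget0, hp]
    simp only [List.getElem?_cons_zero, Option.getD_some,
      PySem.Str.findFrom_eq, String.toList_singleton, PySem.Chars.findFrom_zero,
      List.isEmpty_cons, Bool.false_eq_true, if_false]
    cases hF : target.toList.findIdx? (· = p) with
    | none =>
      rw [find_singleton_none hF]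
      rw [altLoop_head p ps _ target.toList 0 (-1), hF]
      simp
    | some j =>
      have hjlt : j < target.toList.length := by
        rw [List.findIdx?_eq_some_iff_getElem] at hF
        exact hF.1
      rw [find_singleton_some hF]
      rw [altLoop_head p ps _ target.toList 0 (-1), hF]
      have hnn : ¬ ((j:Int) < 0) := by omega
      rw [if_neg hnn]
      simp only [beq_self_eq_true, Bool.true_and]
      have hstep : (j:Int) + 1 = ((j + 1 : Nat) : Int) := by push_cast; ring
      rw [hstep]
      conv_lhs => rw [show ((0:Int)+1) = ((1:Nat):Int) from by norm_num, ← hp]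
      rw [loopA_eq target pattern ps 1 (by omega) (by rw [hp]; rfl) _
        (by positivity) (by rw [Int.toNat_natCast]; omega)]
      rw [Int.toNat_natCast]
      by_cases h1 : (p :: ps).length = 1
      · have hps : ps = [] := by
          cases ps with
          | nil => rfl
          | cons a b => simp at h1
        rw [if_pos h1]
        subst hps
        simp [gmatch, zero_add]
      · rw [if_neg h1]
        have hr := altLoop_rest (p :: ps) (p :: ps).length rfl
          (target.toList.drop (j + 1)) (0 + (j:Int) + 1) 1 (0 + (j:Int))
          (by omega) (by simp)
        set r := asciiFuzzyIndexAltLoop (p :: ps) (p :: ps).length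
          (target.toList.drop (j + 1)) (0 + (j:Int) + 1) 1 (0 + (j:Int)) with hrdef
        obtain ⟨hr2, hrle, hriff⟩ := hr
        cases hg : gmatch ps (target.toList.drop (j + 1)) with
        | true =>
          have hR : r.1 = (p :: ps).length := hriff.mpr (by simpa using hg)
          rw [if_pos rfl]
          conv_rhs => rw [if_neg (show ¬ r.1 < (p :: ps).length by rw [hR]; omega), hr2]
          simp only [zero_add, decide_eq_true_eq, gt_iff_lt]
        | false =>
          have hR : r.1 ≠ (p :: ps).length := fun h => by
            have := hriff.mp h
            simp only [List.drop_one, List.tail_cons] at this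
            rw [this] at hg
            exact Bool.noConfusion hg
          rw [if_neg (by simp), if_pos (by omega)]  -- hrle, hR give r.1 < length

theorem asciiFuzzyIndex_spec : Claim_equal_asciiFuzzyIndex := by
  intro target pattern _
  exact main_eq target pattern
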